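-- pv_equiv track=rewrite | github.com/ihmwg/python-ihm | ihm/metadata.py | _get_aligned_region
-- ===== SOURCE A (Python) =====
-- def _get_aligned_region(tgt_seq, tmpl_seq):
--     """Given two primary sequences, return the range of each that is
--        aligned (i.e. from the first aligned residue in both sequences to
--        the last)"""
--     first = True
--     tgt_pos = 0
--     tmpl_pos = 0
--     start_align = end_align = None
--     for tgt, tmpl in zip(tgt_seq, tmpl_seq):
--         if tgt != '-':
--             tgt_pos += 1
--         if tmpl != '-':
--             tmpl_pos += 1
--             if tgt != '-':
--                 end_align = (tgt_pos, tmpl_pos)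
--                 if first:
--                     start_align = end_align
--                     first = False
--     if first:
--         raise ValueError("Cannot parse empty alignment")
--     return (start_align[0], end_align[0]), (start_align[1], end_align[1])
-- ===== SOURCE B (Python) =====
-- def _get_aligned_region(tgt_seq, tmpl_seq):
--     """Given two primary sequences, return the range of each that is
--        aligned (i.e. from the first aligned residue in both sequences to
--        the last)"""
--     tgt = list(tgt_seq)
--     tmpl = list(tmpl_seq)
--     n = min(len(tgt), len(tmpl))
--     idxs = [i for i in range(n) if tgt[i] != '-' and tmpl[i] != '-']
--     if not idxs:
--         raise ValueError("Cannot parse empty alignment")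
--     fi, li = idxs[0], idxs[-1]
--
--     def nongaps(seq, i):
--         return sum(1 for c in seq[:i + 1] if c != '-')
--
--     return ((nongaps(tgt, fi), nongaps(tgt, li)),
--             (nongaps(tmpl, fi), nongaps(tmpl, li)))
-- ===== Notes on version B (the rewrite author's own statement) =====
-- stated objective: simpler
-- what changed: Replaces the stateful single pass (first-flag, two running counters, start/end accumulators) by first listing the aligned column indices, then computing each coordinate as a prefix count of non-gap characters.
import Mathlib
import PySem

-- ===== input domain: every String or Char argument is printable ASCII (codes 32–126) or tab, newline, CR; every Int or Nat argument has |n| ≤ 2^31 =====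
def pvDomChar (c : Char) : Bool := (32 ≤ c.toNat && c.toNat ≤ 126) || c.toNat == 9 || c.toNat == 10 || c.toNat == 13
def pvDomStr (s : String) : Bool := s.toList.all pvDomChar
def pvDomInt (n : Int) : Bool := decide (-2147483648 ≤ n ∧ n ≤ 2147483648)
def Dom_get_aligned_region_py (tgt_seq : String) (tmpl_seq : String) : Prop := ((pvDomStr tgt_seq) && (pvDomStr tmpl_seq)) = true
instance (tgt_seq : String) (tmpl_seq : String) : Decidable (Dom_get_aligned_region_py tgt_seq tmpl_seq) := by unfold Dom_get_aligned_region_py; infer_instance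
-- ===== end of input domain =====

-- B replaces A's stateful single pass (first-flag, running counters, start/end accumulators)
-- by listing the aligned column indices and computing each coordinate as a prefix count
-- of non-gap characters (objective: simpler decomposition, same cost).

-- ===== PORT A =====
-- loop body of A's `for tgt, tmpl in zip(...)`, state = (first, tgt_pos, tmpl_pos, start_align, end_align)
def agrStep (s : Bool × Int × Int × Option (Int × Int) × Option (Int × Int))
    (p : Char × Char) : Bool × Int × Int × Option (Int × Int) × Option (Int × Int) :=
  let (first, tgt_pos0, tmpl_pos0, st, en) := s
  let tgt_pos := if p.1 != '-' then tgt_pos0 + 1 else tgt_pos0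
  if p.2 != '-' then
    let tmpl_pos := tmpl_pos0 + 1
    if p.1 != '-' then
      if first then (false, tgt_pos, tmpl_pos, some (tgt_pos, tmpl_pos), some (tgt_pos, tmpl_pos))
      else (first, tgt_pos, tmpl_pos, st, some (tgt_pos, tmpl_pos))
    else (first, tgt_pos, tmpl_pos, st, en)
  else (first, tgt_pos, tmpl_pos0, st, en)

def get_aligned_region_py (tgt_seq : String) (tmpl_seq : String) : (Int × Int) × (Int × Int) :=
  let s := (tgt_seq.toList.zip tmpl_seq.toList).foldl agrStep (true, 0, 0, none, none)
  match s.2.2.2.1, s.2.2.2.2 with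
  | some st, some en => ((st.1, en.1), (st.2, en.2))
  | _, _ => ((0, 0), (0, 0))   -- Python raises ValueError("Cannot parse empty alignment") here; excluded by Pre_

-- ===== PORT B =====
-- B's helper `nongaps(seq, i)`: non-gap characters in seq[:i+1]
def bNongaps (s : List Char) (i : Nat) : Int :=
  (((s.take (i + 1)).filter (fun c => c != '-')).length : Int)

def get_aligned_region_py_alt (tgt_seq : String) (tmpl_seq : String) : (Int × Int) × (Int × Int) :=
  let t := tgt_seq.toList
  let m := tmpl_seq.toList
  let n := min t.length m.length
  let idxsB := (List.range n).filter (fun i => (t.getD i '-' != '-') && (m.getD i '-' != '-'))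
  match idxsB with
  | [] => ((0, 0), (0, 0))     -- Python raises ValueError("Cannot parse empty alignment") here; excluded by Pre_
  | fi :: rest =>
    let li := (fi :: rest).getLast (List.cons_ne_nil _ _)
    ((bNongaps t fi, bNongaps t li), (bNongaps m fi, bNongaps m li))

-- ===== PRECONDITION & SPEC =====
-- Pre_ excludes exactly the inputs with no aligned column (both characters non-gap at the
-- same position), on which the Python A raises ValueError (and B raises the same ValueError).
def Pre_get_aligned_region_py (tgt_seq : String) (tmpl_seq : String) : Prop :=
  (tgt_seq.toList.zip tmpl_seq.toList).any (fun p => (p.1 != '-') && (p.2 != '-')) = true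

instance (tgt_seq : String) (tmpl_seq : String) : Decidable (Pre_get_aligned_region_py tgt_seq tmpl_seq) := by
  unfold Pre_get_aligned_region_py; infer_instance

def pvWitness_get_aligned_region_py : String × String := ("AC-G", "A-CG")

def Spec_get_aligned_region_py (tgt_seq : String) (tmpl_seq : String) (out : (Int × Int) × (Int × Int)) : Prop := out = get_aligned_region_py_alt tgt_seq tmpl_seq
instance (tgt_seq : String) (tmpl_seq : String) (out : (Int × Int) × (Int × Int)) : Decidable (Spec_get_aligned_region_py tgt_seq tmpl_seq out) := by unfold Spec_get_aligned_region_py; infer_instance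

-- ===== CLAIM (what is proved, stated in full; the proofs are below) =====
def Claim_equal_get_aligned_region_py : Prop := ∀ (tgt_seq : String) (tmpl_seq : String), Dom_get_aligned_region_py tgt_seq tmpl_seq → Pre_get_aligned_region_py tgt_seq tmpl_seq → Spec_get_aligned_region_py tgt_seq tmpl_seq (get_aligned_region_py tgt_seq tmpl_seq)

-- ===== LEMMAS AND PROOFS =====

def agrGood (p : Char × Char) : Bool := (p.1 != '-') && (p.2 != '-')

def cnt1 (P : List (Char × Char)) : Int := ((P.filter (fun p => p.1 != '-')).length : Int)
def cnt2 (P : List (Char × Char)) : Int := ((P.filter (fun p => p.2 != '-')).length : Int)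

def idxsP (P : List (Char × Char)) : List Nat :=
  (List.range P.length).filter (fun i => agrGood (P.getD i ('-', '-')))

def mkPair (P : List (Char × Char)) (i : Nat) : Int × Int :=
  (cnt1 (P.take (i + 1)), cnt2 (P.take (i + 1)))

lemma mem_idxsP_lt {P : List (Char × Char)} {i : Nat} (h : i ∈ idxsP P) : i < P.length := by
  have := List.mem_filter.mp h
  simpa using List.mem_range.mp this.1

lemma idxsP_append (P : List (Char × Char)) (p : Char × Char) :
    idxsP (P ++ [p]) = idxsP P ++ (if agrGood p then [P.length] else []) := by
  unfold idxsP
  rw [show (P ++ [p]).length = P.length + 1 by simp, List.range_succ, List.filter_append]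
  congr 1
  · apply List.filter_congr
    intro i hi
    have hi' := List.mem_range.mp hi
    simp [List.getD, List.getElem?_append_left hi']
  · by_cases h : agrGood p = true <;> simp [List.getD, h]

lemma mkPair_append {P : List (Char × Char)} (p : Char × Char) {i : Nat} (h : i < P.length) :
    mkPair (P ++ [p]) i = mkPair P i := by
  unfold mkPair
  rw [List.take_append_of_le_length h]

lemma idxsP_nil_iff (P : List (Char × Char)) : idxsP P = [] ↔ P.any agrGood = false := by
  unfold idxsP
  rw [List.filter_eq_nil_iff]
  constructor
  · intro h
    rw [List.any_eq_false]
    intro x hx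
    obtain ⟨i, hi, rfl⟩ := List.mem_iff_getElem.mp hx
    have := h i (List.mem_range.mpr hi)
    simpa [List.getD, List.getElem?_eq_getElem hi] using this
  · intro h i hi
    have hi' := List.mem_range.mp hi
    have := List.any_eq_false.mp h (P[i]'hi') (List.getElem_mem hi')
    simpa [List.getD, List.getElem?_eq_getElem hi'] using this

lemma head?_map_mk (P : List (Char × Char)) (p : Char × Char) :
    ((idxsP P).head?).map (mkPair (P ++ [p])) = ((idxsP P).head?).map (mkPair P) := by
  cases h : (idxsP P).head? with
  | none => rfl
  | some i =>
    have hm : i ∈ idxsP P := List.mem_of_mem_head? h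
    simp [mkPair_append p (mem_idxsP_lt hm)]

lemma getLast?_map_mk (P : List (Char × Char)) (p : Char × Char) :
    ((idxsP P).getLast?).map (mkPair (P ++ [p])) = ((idxsP P).getLast?).map (mkPair P) := by
  cases h : (idxsP P).getLast? with
  | none => rfl
  | some i =>
    have hm : i ∈ idxsP P := List.mem_of_mem_getLast? h
    simp [mkPair_append p (mem_idxsP_lt hm)]

lemma cnt1_append (P : List (Char × Char)) (p : Char × Char) :
    cnt1 (P ++ [p]) = if p.1 != '-' then cnt1 P + 1 else cnt1 P := by
  by_cases h : p.1 != '-' <;> simp [cnt1, List.filter_append, h]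

lemma cnt2_append (P : List (Char × Char)) (p : Char × Char) :
    cnt2 (P ++ [p]) = if p.2 != '-' then cnt2 P + 1 else cnt2 P := by
  by_cases h : p.2 != '-' <;> simp [cnt2, List.filter_append, h]

lemma foldl_char (P : List (Char × Char)) :
    P.foldl agrStep (true, (0 : Int), (0 : Int), none, none)
      = (!(P.any agrGood), cnt1 P, cnt2 P,
         ((idxsP P).head?).map (mkPair P), ((idxsP P).getLast?).map (mkPair P)) := by
  induction P using List.reverseRecOn with
  | nil => simp [cnt1, cnt2, idxsP]
  | append_singleton P p ih =>
    rw [List.foldl_append, ih, List.foldl_cons, List.foldl_nil, idxsP_append]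
    by_cases hg : agrGood p = true
    · have h1 : (p.1 != '-') = true := (Bool.and_eq_true _ _ ▸ hg).1
      have h2 : (p.2 != '-') = true := (Bool.and_eq_true _ _ ▸ hg).2
      have hmk : mkPair (P ++ [p]) P.length = (cnt1 P + 1, cnt2 P + 1) := by
        unfold mkPair
        rw [List.take_of_length_le (by simp), cnt1_append, cnt2_append, h1, h2]
        simp
      by_cases ha : P.any agrGood = true
      · have hne : idxsP P ≠ [] := by
          intro h; rw [idxsP_nil_iff] at h; simp [h] at ha
        simp only [agrStep, h1, h2, ha, Bool.not_true, if_true, if_false, Bool.false_eq_true]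
        rw [cnt1_append, cnt2_append, h1, h2]
        simp only [hg, if_true, List.any_append, ha, List.any_cons, List.any_nil]
        rw [List.head?_append_of_ne_nil _ hne, head?_map_mk]
        rw [List.getLast?_concat]
        simp [hmk]
      · have hnil : idxsP P = [] := (idxsP_nil_iff P).mpr (by simpa using ha)
        simp only [agrStep, h1, h2, if_true]
        rw [cnt1_append, cnt2_append, h1, h2]
        simp only [ha, Bool.not_false, if_true, hg, hnil, List.nil_append,
          List.any_append, List.any_cons, List.any_nil]
        simp [hmk]
    · have hgf : agrGood p = false := by simpa using hg
      rw [cnt1_append, cnt2_append]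
      simp only [hgf, List.any_append, List.any_cons, List.any_nil, Bool.or_false]
      rw [show (if false = true then [P.length] else ([]:List Nat)) = [] from rfl, List.append_nil]
      rw [head?_map_mk, getLast?_map_mk]
      unfold agrStep agrGood at *
      by_cases h2 : (p.2 != '-') = true
      · have h1 : (p.1 != '-') = false := by
          by_contra hc
          simp only [Bool.not_eq_false] at hc
          simp [hc, h2] at hgf
        simp [h1, h2]
      · simp only [Bool.not_eq_true] at h2
        by_cases h1 : (p.1 != '-') = true <;> simp [h1, h2]

lemma cnt1_take_zip : ∀ (T M : List Char) (k : Nat), k ≤ M.length →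
    cnt1 ((T.zip M).take k) = (((T.take k).filter (fun c => c != '-')).length : Int) := by
  intro T
  induction T with
  | nil => intro M k _; simp [cnt1]
  | cons t T ih =>
    intro M k hk
    cases M with
    | nil =>
        have hk0 : k = 0 := Nat.le_zero.mp (by simpa using hk)
        subst hk0; simp [cnt1]
    | cons m M =>
      cases k with
      | zero => simp [cnt1]
      | succ k =>
        have hk' : k ≤ M.length := by simpa using hk
        by_cases h : (t != '-') = true <;>
          simp [cnt1, List.zip_cons_cons, h, ← ih M k hk', cnt1]

lemma cnt2_take_zip : ∀ (T M : List Char) (k : Nat), k ≤ T.length →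
    cnt2 ((T.zip M).take k) = (((M.take k).filter (fun c => c != '-')).length : Int) := by
  intro T
  induction T with
  | nil =>
    intro M k hk
    have hk0 : k = 0 := Nat.le_zero.mp (by simpa using hk)
    subst hk0; simp [cnt2]
  | cons t T ih =>
    intro M k hk
    cases M with
    | nil => simp [cnt2]
    | cons m M =>
      cases k with
      | zero => simp [cnt2]
      | succ k =>
        have hk' : k ≤ T.length := by simpa using hk
        by_cases h : (m != '-') = true <;>
          simp [cnt2, List.zip_cons_cons, h, ← ih M k hk', cnt2]

lemma bNongaps_fst {T M : List Char} {i : Nat} (h : i < (T.zip M).length) :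
    bNongaps T i = (mkPair (T.zip M) i).1 := by
  rw [List.length_zip] at h
  unfold bNongaps mkPair
  rw [cnt1_take_zip T M (i + 1) (by omega)]

lemma bNongaps_snd {T M : List Char} {i : Nat} (h : i < (T.zip M).length) :
    bNongaps M i = (mkPair (T.zip M) i).2 := by
  rw [List.length_zip] at h
  unfold bNongaps mkPair
  rw [cnt2_take_zip T M (i + 1) (by omega)]

lemma idxsB_eq_idxsP (T M : List Char) :
    (List.range (min T.length M.length)).filter
        (fun i => (T.getD i '-' != '-') && (M.getD i '-' != '-'))
      = idxsP (T.zip M) := by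
  unfold idxsP
  rw [List.length_zip]
  apply List.filter_congr
  intro i hi
  have hi' := List.mem_range.mp hi
  have h1 : i < T.length := lt_of_lt_of_le hi' (min_le_left _ _)
  have h2 : i < M.length := lt_of_lt_of_le hi' (min_le_right _ _)
  have hz : i < (T.zip M).length := by rw [List.length_zip]; omega
  simp [agrGood, List.getD, h1, h2, List.getElem_zip]

-- ===== VERDICT (by name: the statement is the Claim_ definition above) =====
theorem get_aligned_region_py_spec : Claim_equal_get_aligned_region_py := by
  intro tgt_seq tmpl_seq _ hpre
  unfold Spec_get_aligned_region_py get_aligned_region_py get_aligned_region_py_alt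
  have hpre' : (tgt_seq.toList.zip tmpl_seq.toList).any agrGood = true := hpre
  have hne : idxsP (tgt_seq.toList.zip tmpl_seq.toList) ≠ [] := by
    intro h; rw [idxsP_nil_iff] at h; rw [hpre'] at h; cases h
  cases hI : idxsP (tgt_seq.toList.zip tmpl_seq.toList) with
  | nil => exact absurd hI hne
  | cons fi rest =>
    have hfi : fi ∈ idxsP (tgt_seq.toList.zip tmpl_seq.toList) := by rw [hI]; exact List.mem_cons_self
    have hli : (fi :: rest).getLast (List.cons_ne_nil _ _) ∈ idxsP (tgt_seq.toList.zip tmpl_seq.toList) := by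
      rw [hI]; exact List.getLast_mem _
    have hlast : (fi :: rest).getLast? = some ((fi :: rest).getLast (List.cons_ne_nil _ _)) :=
      List.getLast?_eq_some_getLast _
    simp only [foldl_char, idxsB_eq_idxsP, hI, List.head?_cons, hlast, Option.map_some]
    rw [bNongaps_fst (mem_idxsP_lt hfi), bNongaps_fst (mem_idxsP_lt hli),
        bNongaps_snd (mem_idxsP_lt hfi), bNongaps_snd (mem_idxsP_lt hli)]
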